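-- pv_equiv track=rewrite | github.com/HenokMekuanint/Competitiveprogramming | B. African Crossword.py | AfricanCrossword
-- ===== SOURCE A (Python) =====
-- def AfricanCrossword(matrix):
--     from collections import defaultdict
--     row_freq=[]
--     col_freq=[]
--     ans=[]
--     for i in range(len(matrix)):
--         dicti=defaultdict(int)
--         for j in range(len(matrix[i])):
--             dicti[matrix[i][j]]+=1
--         row_freq.append(dicti)
--     for i in range(len(matrix[0])):
--         dicti2=defaultdict(int)
--         for j in range(len(matrix)):
--             dicti2[matrix[j][i]]+=1
--
--         col_freq.append(dicti2)
--     for i in range(len(matrix)):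
--         for j in range(len(matrix[0])):
--             if row_freq[i][matrix[i][j]]==1 and col_freq[j][matrix[i][j]]==1:
--                 ans.append(matrix[i][j])
--     return ans
-- ===== SOURCE B (Python) =====
-- def AfricanCrossword(matrix):
--     ncols = len(matrix[0])
--     ans = []
--     for row in matrix:
--         for j in range(ncols):
--             c = row[j]
--             if row.count(c) == 1 and sum(1 for r in matrix if r[j] == c) == 1:
--                 ans.append(c)
--     return ans
-- ===== Notes on version B (the rewrite author's own statement) =====
-- stated objective: simpler
-- what changed: Dropped A's two precompute passes that build per-row and per-column frequency dictionaries; B decides each cell directly by re-scanning its row with list.count and its column with a one-line generator sum.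
import Mathlib
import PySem

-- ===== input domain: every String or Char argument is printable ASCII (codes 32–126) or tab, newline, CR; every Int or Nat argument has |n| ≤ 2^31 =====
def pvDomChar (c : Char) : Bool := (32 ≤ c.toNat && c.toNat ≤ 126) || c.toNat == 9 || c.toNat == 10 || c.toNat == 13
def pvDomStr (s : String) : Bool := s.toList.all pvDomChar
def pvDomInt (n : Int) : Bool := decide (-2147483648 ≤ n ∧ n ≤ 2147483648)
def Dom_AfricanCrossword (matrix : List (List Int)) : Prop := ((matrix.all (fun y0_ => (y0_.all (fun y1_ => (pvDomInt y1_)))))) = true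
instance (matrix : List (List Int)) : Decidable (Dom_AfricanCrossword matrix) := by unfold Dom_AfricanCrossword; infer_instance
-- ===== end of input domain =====

-- B drops A's two precomputed frequency-table passes (row_freq/col_freq dicts) and instead
-- re-scans the current row (.count) and column (a 0/1 generator sum) at each cell: simpler,
-- same overall task (keep the chars unique in their row and column, in reading order).

-- ===== PORT A =====
-- Literal transliteration of A: build row_freq (a counter per row), col_freq (a counter per
-- column index 0..len(matrix[0])-1), then the nested loop appending matrix[i][j] when both
-- frequencies are 1.  defaultdict(int) increment → Dict.modify k 0 (·+1); defaultdict read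
-- → Dict.getD _ 0 (the read-side insertion of 0 is value-invisible).  matrix[0] on an empty
-- matrix raises IndexError in Python → excluded by Pre_; here pyGetD with default [].
def AfricanCrossword (matrix : List (List Int)) : List Int :=
  let rowFreq : List (PySem.Dict Int Int) :=
    (PySem.List.pyRange 0 matrix.length 1).foldl (fun acc i =>
      acc ++ [(PySem.List.pyRange 0 (PySem.List.pyGetD matrix i []).length 1).foldl
        (fun d j => d.modify (PySem.List.pyGetD (PySem.List.pyGetD matrix i []) j 0) 0 (· + 1))
        PySem.Dict.empty]) []
  let colFreq : List (PySem.Dict Int Int) :=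
    (PySem.List.pyRange 0 (PySem.List.pyGetD matrix 0 []).length 1).foldl (fun acc i =>
      acc ++ [(PySem.List.pyRange 0 matrix.length 1).foldl
        (fun d j => d.modify (PySem.List.pyGetD (PySem.List.pyGetD matrix j []) i 0) 0 (· + 1))
        PySem.Dict.empty]) []
  (PySem.List.pyRange 0 matrix.length 1).foldl (fun ans i =>
    (PySem.List.pyRange 0 (PySem.List.pyGetD matrix 0 []).length 1).foldl (fun ans j =>
      let c := PySem.List.pyGetD (PySem.List.pyGetD matrix i []) j 0
      if (PySem.List.pyGetD rowFreq i PySem.Dict.empty).getD c 0 == 1 &&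
         (PySem.List.pyGetD colFreq j PySem.Dict.empty).getD c 0 == 1
      then ans ++ [c] else ans) ans) []

-- ===== PORT B =====
-- Literal transliteration of Source B: ncols = len(matrix[0]) (IndexError on [] is outside Pre_,
-- here pyGetD default []); for row in matrix / for j in range(ncols); row.count(c) →
-- List.count; sum(1 for r in matrix if r[j]==c) → sum of a mapped 0/1 list.
def AfricanCrossword_alt (matrix : List (List Int)) : List Int :=
  let ncols := (PySem.List.pyGetD matrix 0 []).length
  matrix.foldl (fun ans row =>
    (PySem.List.pyRange 0 ncols 1).foldl (fun ans j =>
      let c := PySem.List.pyGetD row j 0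
      if row.count c == 1 &&
         (matrix.map (fun r => if PySem.List.pyGetD r j 0 == c then (1 : Int) else 0)).sum == 1
      then ans ++ [c] else ans) ans) []

-- ===== PRECONDITION & SPEC =====
-- Pre_ excludes exactly the inputs where Python A raises IndexError: the empty matrix
-- (matrix[0]) and matrices with a row shorter than the first row (matrix[j][i] in the
-- column pass).  Python B raises on exactly the same inputs.
def Pre_AfricanCrossword (matrix : List (List Int)) : Prop :=
  matrix ≠ [] ∧ ∀ row ∈ matrix, (matrix.headD []).length ≤ row.length
instance (matrix : List (List Int)) : Decidable (Pre_AfricanCrossword matrix) := by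
  unfold Pre_AfricanCrossword; infer_instance
def pvWitness_AfricanCrossword : List (List Int) := [[1, 2], [2, 3]]
def Spec_AfricanCrossword (matrix : List (List Int)) (out : List Int) : Prop := out = AfricanCrossword_alt matrix
instance (matrix : List (List Int)) (out : List Int) : Decidable (Spec_AfricanCrossword matrix out) := by unfold Spec_AfricanCrossword; infer_instance

-- ===== CLAIM (what is proved, stated in full; the proofs are below) =====
def Claim_equal_AfricanCrossword : Prop := ∀ (matrix : List (List Int)), Dom_AfricanCrossword matrix → Pre_AfricanCrossword matrix → Spec_AfricanCrossword matrix (AfricanCrossword matrix)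

-- ===== LEMMAS AND PROOFS =====

-- the hand-rolled defaultdict row loop is Counter(row)
theorem pv_rowCounter (row : List Int) :
    (PySem.List.pyRange 0 (row.length : Int) 1).foldl
      (fun d j => d.modify (PySem.List.pyGetD row j 0) 0 (· + 1)) PySem.Dict.empty
    = PySem.Dict.counter row :=
  (PySem.List.foldl_pyRange_zero_pyGetD' row 0
      (fun (d : PySem.Dict Int Int) x => d.modify x 0 (· + 1)) PySem.Dict.empty).trans
    (PySem.Dict.counter_eq_foldl row).symm

-- the hand-rolled defaultdict column loop is Counter(column j)
theorem pv_colCounter (matrix : List (List Int)) (j : Int) :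
    (PySem.List.pyRange 0 (matrix.length : Int) 1).foldl
      (fun d k => d.modify (PySem.List.pyGetD (PySem.List.pyGetD matrix k []) j 0) 0 (· + 1)) PySem.Dict.empty
    = PySem.Dict.counter (matrix.map (fun r => PySem.List.pyGetD r j 0)) := by
  have h := PySem.List.foldl_pyRange_zero_pyGetD' matrix []
      (fun (d : PySem.Dict Int Int) (r : List Int) => d.modify (PySem.List.pyGetD r j 0) 0 (· + 1))
      PySem.Dict.empty
  rw [h, PySem.Dict.counter_eq_foldl, List.foldl_map]

theorem pv_cast_one (n : Nat) : (((n : Int)) == 1) = (n == 1) := by simp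

theorem pv_count_map (f : List Int → Int) (l : List (List Int)) (c : Int) :
    (l.map f).count c = l.countP (fun r => f r == c) := by
  rw [List.count, List.countP_map]; rfl

theorem AfricanCrossword_eq (matrix : List (List Int)) :
    AfricanCrossword matrix = AfricanCrossword_alt matrix := by
  unfold AfricanCrossword AfricanCrossword_alt
  simp only []
  have hRF : (PySem.List.pyRange 0 (matrix.length : Int) 1).foldl
      (fun acc i => acc ++ [(PySem.List.pyRange 0 ((PySem.List.pyGetD matrix i []).length : Int) 1).foldl
        (fun d j => d.modify (PySem.List.pyGetD (PySem.List.pyGetD matrix i []) j 0) 0 (· + 1))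
        PySem.Dict.empty]) []
      = (PySem.List.pyRange 0 (matrix.length : Int) 1).map
        (fun i => PySem.Dict.counter (PySem.List.pyGetD matrix i [])) := by
    rw [PySem.List.foldl_append_singleton_eq_map, List.nil_append]
    exact List.map_congr_left (fun i _ => pv_rowCounter (PySem.List.pyGetD matrix i []))
  have hCF : (PySem.List.pyRange 0 ((PySem.List.pyGetD matrix 0 []).length : Int) 1).foldl
      (fun acc i => acc ++ [(PySem.List.pyRange 0 (matrix.length : Int) 1).foldl
        (fun d j => d.modify (PySem.List.pyGetD (PySem.List.pyGetD matrix j []) i 0) 0 (· + 1))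
        PySem.Dict.empty]) []
      = (PySem.List.pyRange 0 ((PySem.List.pyGetD matrix 0 []).length : Int) 1).map
        (fun i => PySem.Dict.counter (matrix.map (fun r => PySem.List.pyGetD r i 0))) := by
    rw [PySem.List.foldl_append_singleton_eq_map, List.nil_append]
    exact List.map_congr_left (fun i _ => pv_colCounter matrix i)
  rw [hRF, hCF]
  refine Eq.trans (PySem.List.foldl_congr_mem _ _ _ _ ?_)
    (PySem.List.foldl_pyRange_zero_pyGetD' matrix []
      (fun (ans : List Int) (row : List Int) =>
        (PySem.List.pyRange 0 ((PySem.List.pyGetD matrix 0 []).length : Int) 1).foldl (fun ans j =>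
          let c := PySem.List.pyGetD row j 0
          if row.count c == 1 &&
             (matrix.map (fun r => if PySem.List.pyGetD r j 0 == c then (1 : Int) else 0)).sum == 1
          then ans ++ [c] else ans) ans) [])
  intro ans i hi
  obtain ⟨hi0, hiN⟩ := (PySem.List.mem_pyRange_one).1 hi
  rw [PySem.List.pyGetD_map_pyRange_of_nonneg _ _ _ _ hi0 hiN]
  refine PySem.List.foldl_congr_mem _ _ _ _ (fun ans j hj => ?_)
  obtain ⟨hj0, hjN⟩ := (PySem.List.mem_pyRange_one).1 hj
  rw [PySem.List.pyGetD_map_pyRange_of_nonneg _ _ _ _ hj0 hjN]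
  simp only [PySem.Dict.getD_counter, PySem.List.sum_map_ite_one_zero, pv_cast_one, pv_count_map]

-- ===== VERDICT (by name: the statement is the Claim_ definition above) =====
theorem AfricanCrossword_spec : Claim_equal_AfricanCrossword := by
  intro matrix _ _
  unfold Spec_AfricanCrossword
  exact AfricanCrossword_eq matrix
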